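-- pv_equiv track=rewrite | github.com/LastGunslinger/project_euler | project_euler/problems/067.py | gen_triangle
-- ===== SOURCE A (Python) =====
-- from typing import List
--
-- def gen_triangle(data: List[int]) -> List[List[int]]:
--     triangle = []
--     start = 0
--     row_len = 1
--     while start + row_len < len(data) + 1:
--         triangle.append(data[start:start + row_len])
--         start += row_len
--         row_len += 1
--
--     return triangle
-- ===== SOURCE B (Python) =====
-- from typing import List
--
-- def gen_triangle(data: List[int]) -> List[List[int]]:
--     triangle = []
--     row = []
--     target = 1
--     for x in data:
--         row.append(x)
--         if len(row) == target:
--             triangle.append(row)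
--             row = []
--             target += 1
--     return triangle
-- ===== Notes on version B (the rewrite author's own statement) =====
-- stated objective: alternative
-- what changed: Replaces the while-loop over slice offsets (start/row_len with data[start:start+row_len]) by a single pass over the elements that accumulates a current-row buffer and commits it when it reaches the growing target length, dropping any partial trailing row exactly as A does.
import Mathlib
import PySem

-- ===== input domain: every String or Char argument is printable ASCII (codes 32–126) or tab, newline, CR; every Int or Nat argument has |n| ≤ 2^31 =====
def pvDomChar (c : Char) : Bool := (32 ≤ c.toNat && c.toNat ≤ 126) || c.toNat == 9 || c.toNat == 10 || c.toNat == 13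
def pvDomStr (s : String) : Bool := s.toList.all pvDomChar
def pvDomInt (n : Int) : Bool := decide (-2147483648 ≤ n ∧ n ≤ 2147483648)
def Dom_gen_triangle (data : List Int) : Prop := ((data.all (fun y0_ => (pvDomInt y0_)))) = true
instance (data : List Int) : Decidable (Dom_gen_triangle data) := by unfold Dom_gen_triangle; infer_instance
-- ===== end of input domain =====

-- B builds the triangle in one pass with a current-row buffer instead of A's slice offsets; objective: alternative decomposition (same cost).
-- ===== PORT A =====
-- while start + row_len < len(data) + 1: triangle.append(data[start:start+row_len]); start += row_len; row_len += 1
def genTriangleLoopA (data : List Int) (triangle : List (List Int)) (start rowLen : Nat) :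
    List (List Int) :=
  if start + rowLen < data.length + 1 then
    genTriangleLoopA data
      (triangle ++ [PySem.List.slice data (some (start : Int)) (some ((start : Int) + (rowLen : Int)))])
      (start + rowLen) (rowLen + 1)
  else triangle
termination_by data.length + 1 - (start + rowLen)
decreasing_by omega

def gen_triangle (data : List Int) : List (List Int) :=
  genTriangleLoopA data [] 0 1

-- ===== PORT B =====
-- for x in data: row.append(x); if len(row) == target: triangle.append(row); row = []; target += 1
def genTriangleGoB (rest : List Int) (row : List Int) (target : Nat)
    (triangle : List (List Int)) : List (List Int) :=
  match rest with
  | [] => triangle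
  | x :: xs =>
    let row' := row ++ [x]
    if row'.length = target then genTriangleGoB xs [] (target + 1) (triangle ++ [row'])
    else genTriangleGoB xs row' target triangle

def gen_triangle_alt (data : List Int) : List (List Int) :=
  genTriangleGoB data [] 1 []

-- ===== PRECONDITION & SPEC =====
def Spec_gen_triangle (data : List Int) (out : List (List Int)) : Prop := out = gen_triangle_alt data
instance (data : List Int) (out : List (List Int)) : Decidable (Spec_gen_triangle data out) := by unfold Spec_gen_triangle; infer_instance

-- ===== CLAIM (what is proved, stated in full; the proofs are below) =====
def Claim_equal_gen_triangle : Prop := ∀ (data : List Int), Dom_gen_triangle data → Spec_gen_triangle data (gen_triangle data)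

-- ===== LEMMAS AND PROOFS =====

-- One full row of B's element loop, expressed in terms of take/drop.
theorem genTriangleGoB_row (rest : List Int) :
    ∀ (row : List Int) (target : Nat) (tri : List (List Int)),
      row.length < target →
      genTriangleGoB rest row target tri =
        if target - row.length ≤ rest.length then
          genTriangleGoB (rest.drop (target - row.length)) [] (target + 1)
            (tri ++ [row ++ rest.take (target - row.length)])
        else tri := by
  induction rest with
  | nil =>
      intro row target tri h
      simp only [genTriangleGoB, List.length_nil, List.drop_nil, List.take_nil]
      rw [if_neg (by omega)]
  | cons x xs ih =>
      intro row target tri h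
      simp only [genTriangleGoB]
      by_cases hfull : (row ++ [x]).length = target
      · rw [if_pos hfull]
        have hk : target - row.length = 1 := by simp at hfull; omega
        rw [if_pos (by simp [hk])]
        simp [hk]
      · rw [if_neg hfull]
        have hlt : (row ++ [x]).length < target := by simp at hfull ⊢; omega
        rw [ih _ _ _ hlt]
        have hk : target - (row ++ [x]).length = target - row.length - 1 := by
          simp; omega
        have hk1 : 1 ≤ target - row.length := by omega
        by_cases hle : target - row.length ≤ xs.length + 1
        · rw [if_pos (by simp at hlt; omega), if_pos (by simp; omega)]
          obtain ⟨m, hm⟩ : ∃ m, target - row.length = m + 1 := ⟨target - row.length - 1, by omega⟩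
          rw [hk, hm]
          simp
        · rw [if_neg (by simp at hlt; omega), if_neg (by simp; omega)]

-- A's loop equals B's loop run on the remaining suffix with an empty buffer.
theorem loopA_eq_goB (data : List Int) :
    ∀ (k start rowLen : Nat) (tri : List (List Int)),
      data.length - start ≤ k → 1 ≤ rowLen →
      genTriangleLoopA data tri start rowLen =
        genTriangleGoB (data.drop start) [] rowLen tri := by
  intro k
  induction k with
  | zero =>
      intro start rowLen tri hk h1
      rw [genTriangleLoopA, if_neg (by omega)]
      rw [genTriangleGoB_row _ _ _ _ (by simpa using h1), if_neg (by simp; omega)]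
  | succ n ih =>
      intro start rowLen tri hk h1
      rw [genTriangleLoopA,
          genTriangleGoB_row _ _ _ _ (by simpa using h1)]
      by_cases hc : start + rowLen < data.length + 1
      · rw [if_pos hc, if_pos (by simp; omega)]
        rw [ih _ _ _ (by omega) (by omega)]
        rw [PySem.List.slice_natCast_add]
        simp [List.drop_drop]
      · rw [if_neg hc, if_neg (by simp; omega)]

-- ===== VERDICT (by name: the statement is the Claim_ definition above) =====
theorem gen_triangle_spec : Claim_equal_gen_triangle := by
  intro data _
  unfold Spec_gen_triangle gen_triangle gen_triangle_alt
  rw [loopA_eq_goB data data.length 0 1 [] (by omega) (by omega)]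
  simp
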